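-- pv_equiv track=rewrite | github.com/pedro-maschio/ComputationalSecurity | Trabalho1/Trabalho1-teste.py | find_matchings
-- ===== SOURCE A (Python) =====
-- def find_matchings(cipherText):
--     matching_numbers = []
--
--     for i in range(1, len(cipherText)):
--         match_count = 0
--         temp = i
--         for j in range(len(cipherText)):
--             if cipherText[j] == cipherText[temp] and cipherText[j] != ' ' and cipherText[temp] != ' ':
--                 match_count += 1
--             temp += 1
--             if temp >= len(cipherText):
--                 break
--         matching_numbers.append(match_count)
--
--     return matching_numbers
-- ===== SOURCE B (Python) =====
-- def find_matchings(cipherText):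
--     n = len(cipherText)
--     res = [0] * (n - 1 if n > 0 else 0)
--     for c in dict.fromkeys(cipherText):
--         if c == ' ':
--             continue
--         ps = [i for i in range(n) if cipherText[i] == c]
--         for a in range(len(ps)):
--             for b in range(a + 1, len(ps)):
--                 res[ps[b] - ps[a] - 1] += 1
--     return res
-- ===== Notes on version B (the rewrite author's own statement) =====
-- stated objective: alternative
-- what changed: A compares the text against its own shift for every offset; B instead groups positions by character (one dict.fromkeys pass plus a positions list per distinct character) and, within each character's position list, scatters one increment per ordered position pair into slot (diff-1), so no character comparison across shifts remains.
import Mathlib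
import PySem

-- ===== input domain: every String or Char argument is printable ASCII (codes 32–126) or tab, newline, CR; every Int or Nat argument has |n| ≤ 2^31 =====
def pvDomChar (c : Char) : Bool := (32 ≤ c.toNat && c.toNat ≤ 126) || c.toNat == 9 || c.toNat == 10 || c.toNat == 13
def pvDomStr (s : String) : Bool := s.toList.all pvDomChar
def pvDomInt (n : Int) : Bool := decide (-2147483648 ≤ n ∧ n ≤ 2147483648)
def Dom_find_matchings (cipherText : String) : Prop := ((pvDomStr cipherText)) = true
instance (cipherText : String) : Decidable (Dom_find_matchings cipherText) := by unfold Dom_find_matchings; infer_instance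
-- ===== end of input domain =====

-- B replaces A's shift-by-shift self-comparison by a group-by-character pass: positions are
-- grouped per distinct character and each ordered pair of equal-character positions scatters
-- one increment into slot (difference - 1) (objective: alternative).

-- cipherText[idx] — every access made by either program is in range, so the ' ' default is never used
def pvAt (l : List Char) (i : Int) : Char := PySem.List.pyGetD l i ' '

-- ===== PORT A =====
def find_matchings (cipherText : String) : List Int :=
  let l := cipherText.toList
  let n : Int := (l.length : Int)
  (PySem.List.pyRange 1 n 1).foldl (fun acc i =>
    let st := (PySem.List.pyRange 0 n 1).foldl
      (fun (st : Bool × Int × Int) j =>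
        if st.1 then st  -- loop already broken
        else
          let mc := if pvAt l j = pvAt l st.2.2 ∧ pvAt l j ≠ ' ' ∧ pvAt l st.2.2 ≠ ' '
                    then st.2.1 + 1 else st.2.1
          let temp := st.2.2 + 1
          (decide (temp ≥ n), mc, temp))  -- 'if temp >= len: break'
      (false, 0, i)
    acc ++ [st.2.1]) []

-- ===== PORT B =====
-- res[t] += 1 (t is a valid index at every call site)
def pvIncAt (res : List Int) (t : Int) : List Int :=
  res.mapIdx (fun idx v => if (idx : Int) = t then v + 1 else v)

def find_matchings_alt (cipherText : String) : List Int :=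
  let l := cipherText.toList
  let n : Int := (l.length : Int)
  let res0 : List Int := List.replicate (l.length - 1) 0
  (PySem.List.dedup l).foldl (fun res c =>
    if c = ' ' then res
    else
      let ps : List Int := (PySem.List.pyRange 0 n 1).filter (fun i => pvAt l i = c)
      (PySem.List.pyRange 0 (ps.length : Int) 1).foldl (fun res a =>
        (PySem.List.pyRange (a + 1) (ps.length : Int) 1).foldl (fun res b =>
          pvIncAt res (PySem.List.pyGetD ps b 0 - PySem.List.pyGetD ps a 0 - 1)) res) res) res0

-- ===== PRECONDITION & SPEC =====
def Spec_find_matchings (cipherText : String) (out : List Int) : Prop := out = find_matchings_alt cipherText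
instance (cipherText : String) (out : List Int) : Decidable (Spec_find_matchings cipherText out) := by unfold Spec_find_matchings; infer_instance

-- ===== CLAIM (what is proved, stated in full; the proofs are below) =====
def Claim_equal_find_matchings : Prop := ∀ (cipherText : String), Dom_find_matchings cipherText → Spec_find_matchings cipherText (find_matchings cipherText)

-- ===== LEMMAS AND PROOFS =====

-- named copy of A's inner-loop body (definitionally equal to the lambda in the port)
def pvStepA (l : List Char) (n : Int) (st : Bool × Int × Int) (j : Int) : Bool × Int × Int :=
  if st.1 then st
  else
    let mc := if pvAt l j = pvAt l st.2.2 ∧ pvAt l j ≠ ' ' ∧ pvAt l st.2.2 ≠ ' '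
              then st.2.1 + 1 else st.2.1
    let temp := st.2.2 + 1
    (decide (temp ≥ n), mc, temp)

-- the per-shift match predicate, as A tests it (shift i, left index j)
def pvPA (l : List Char) (i j : Nat) : Bool :=
  decide (pvAt l ↑j = pvAt l ↑(i + j) ∧ pvAt l ↑j ≠ ' ' ∧ pvAt l ↑(i + j) ≠ ' ')

-- the canonical per-pair predicate (result slot k, left index j)
def pvPB (l : List Char) (k j : Nat) : Bool :=
  decide (j + k + 1 < l.length ∧ pvAt l ↑(j + k + 1) = pvAt l ↑j ∧ pvAt l ↑j ≠ ' ')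

-- B-side named loop bodies
def pvPos (l : List Char) (c : Char) : List Int :=
  (PySem.List.pyRange 0 (l.length : Int) 1).filter (fun i => pvAt l i = c)

def pvStepIn (ps : List Int) (a : Int) (res : List Int) (b : Int) : List Int :=
  pvIncAt res (PySem.List.pyGetD ps b 0 - PySem.List.pyGetD ps a 0 - 1)

def pvStepMid (ps : List Int) (res : List Int) (a : Int) : List Int :=
  (PySem.List.pyRange (a + 1) (ps.length : Int) 1).foldl (pvStepIn ps a) res

def pvStepOut (l : List Char) (res : List Int) (c : Char) : List Int :=
  if c = ' ' then res
  else (PySem.List.pyRange 0 ((pvPos l c).length : Int) 1).foldl (pvStepMid (pvPos l c)) res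

-- per-slot contribution of row a within character's position list ps
def pvCnt (ps : List Int) (k : Nat) (a : Int) : Nat :=
  (PySem.List.pyRange (a + 1) (ps.length : Int) 1).countP
    (fun b => decide (PySem.List.pyGetD ps b 0 - PySem.List.pyGetD ps a 0 - 1 = (k : Int)))

theorem pvA_unfold (s : String) :
    find_matchings s =
      (PySem.List.pyRange 1 (s.toList.length : Int) 1).foldl (fun acc i =>
        acc ++ [((PySem.List.pyRange 0 (s.toList.length : Int) 1).foldl
          (pvStepA s.toList (s.toList.length : Int)) (false, 0, i)).2.1]) [] := rfl

theorem pvB_unfold (s : String) :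
    find_matchings_alt s =
      (PySem.List.dedup s.toList).foldl (pvStepOut s.toList)
        (List.replicate (s.toList.length - 1) 0) := rfl

theorem pvA_done (l : List Char) (n : Int) (ks : List Int) (st : Bool × Int × Int)
    (h : st.1 = true) : ks.foldl (pvStepA l n) st = st := by
  induction ks with
  | nil => rfl
  | cons x xs ih => simp [pvStepA, h, ih, List.foldl_cons]

theorem pvA_run (l : List Char) (i a : Nat) :
    ∀ (m : Nat) (mc : Int), a + m + i ≤ l.length →
    ((List.range m).map (fun k : Nat => ((a : Int) + (k : Int)))).foldl
        (pvStepA l (l.length : Int)) (false, mc, ((i + a : Nat) : Int))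
      = (decide (0 < m ∧ a + m + i = l.length),
         mc + ((List.range m).countP (fun k => pvPA l i (a + k)) : Int),
         ((i + a + m : Nat) : Int)) := by
  intro m
  induction m with
  | zero => intro mc h; simp
  | succ m ih =>
    intro mc h
    have hlt : a + m + i < l.length := by omega
    rw [List.range_succ, List.map_append, List.foldl_append, ih mc (by omega)]
    have hdone : decide (0 < m ∧ a + m + i = l.length) = false := by
      simp; omega
    rw [hdone]
    simp only [List.map_cons, List.map_nil, List.foldl_cons, List.foldl_nil, pvStepA]
    have h1 : ((a : Int) + (m : Int)) = ((a + m : Nat) : Int) := by push_cast; ring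
    have h4 : (decide (((i + a + m : Nat) : Int) + 1 ≥ (l.length : Int)))
        = decide (0 < m + 1 ∧ a + (m + 1) + i = l.length) := by
      rw [decide_eq_decide]; constructor
      · intro hx; constructor
        · omega
        · have : (i + a + m : Nat) + 1 ≥ l.length := by exact_mod_cast hx
          omega
      · intro hx
        have : ((i + a + m + 1 : Nat) : Int) ≥ (l.length : Int) := by exact_mod_cast Nat.le_of_eq (by omega)
        push_cast at this ⊢; omega
    simp only [Bool.false_eq_true, if_false]
    rw [List.countP_append]
    simp only [List.countP_cons, List.countP_nil]
    have hidx : ((i + a + m : Nat) : Int) = ((i + (a + m) : Nat) : Int) := by push_cast; ring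
    by_cases hc : pvAt l ((a:Int) + (m:Int)) = pvAt l ((i + a + m : Nat) : Int)
        ∧ pvAt l ((a:Int) + (m:Int)) ≠ ' ' ∧ pvAt l ((i + a + m : Nat) : Int) ≠ ' '
    · have hp : pvPA l i (a + m) = true := by
        unfold pvPA; rw [← h1, ← hidx]; exact decide_eq_true hc
      simp only [if_pos hc, hp, h4]
      simp only [Prod.mk.injEq]
      refine ⟨trivial, ?_, ?_⟩
      · simp only [if_true]
        push_cast; ring
      · push_cast; ring
    · have hp : pvPA l i (a + m) = false := by
        unfold pvPA; rw [← h1, ← hidx]; exact decide_eq_false hc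
      simp only [if_neg hc, hp, h4]
      simp only [Prod.mk.injEq]
      refine ⟨trivial, ?_, ?_⟩
      · simp only [Bool.false_eq_true, if_false]
        push_cast; ring
      · push_cast; ring

theorem pvA_inner (l : List Char) (i : Nat) (hin : i < l.length) :
    ((PySem.List.pyRange 0 (l.length : Int) 1).foldl (pvStepA l (l.length : Int))
      (false, 0, (i : Int))).2.1
    = ((List.range (l.length - i)).countP (pvPA l i) : Int) := by
  rw [PySem.List.pyRange_one]
  have hn : (((l.length : Int)) - 0).toNat = l.length := by omega
  rw [hn]
  have hsplit : List.range l.length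
      = List.range (l.length - i) ++ (List.range i).map (fun x => (l.length - i) + x) := by
    conv_lhs => rw [show l.length = (l.length - i) + i from by omega]
    exact List.range_add
  rw [hsplit, List.map_append, List.foldl_append]
  have h0 : ((i : Int)) = ((i + 0 : Nat) : Int) := by push_cast; ring
  have hrun := pvA_run l i 0 (l.length - i) 0 (by omega)
  simp only [Nat.cast_zero] at hrun
  rw [h0, hrun, pvA_done _ _ _ _ (by simp; omega)]
  simp

-- A computes, for each shift i = k+1, the count of left indices j < n - i that match
theorem pvA_char (s : String) :
    find_matchings s = (List.range (s.toList.length - 1)).map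
      (fun k => (((List.range (s.toList.length - (k+1))).countP (pvPA s.toList (k+1))) : Int)) := by
  rw [pvA_unfold, PySem.List.foldl_append_singleton_eq_map]
  conv_lhs => rw [PySem.List.pyRange_one 1 (s.toList.length : Int)]
  have hn : (((s.toList.length : Int)) - 1).toNat = s.toList.length - 1 := by omega
  rw [hn, List.map_map, List.nil_append]
  apply List.map_congr_left
  intro k hk
  rw [List.mem_range] at hk
  have h1 : ((1 : Int) + (k : Int)) = ((k + 1 : Nat) : Int) := by push_cast; ring
  simp only [Function.comp]
  rw [h1, pvA_inner s.toList (k+1) (by omega)]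

-- ---- B side ----

theorem pvLen_inc (res : List Int) (t : Int) : (pvIncAt res t).length = res.length := by
  simp [pvIncAt]

theorem pvGet_inc (res : List Int) (t : Int) (k : Nat) (hk : k < res.length) :
    (pvIncAt res t).getD k 0 = res.getD k 0 + (if (k : Int) = t then 1 else 0) := by
  have h1 : k < (pvIncAt res t).length := by rw [pvLen_inc]; exact hk
  rw [List.getD_eq_getElem _ _ h1, List.getD_eq_getElem _ _ hk]
  unfold pvIncAt
  rw [List.getElem_mapIdx]
  split <;> simp

theorem pvLen_in (ps : List Int) (a : Int) (ks : List Int) :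
    ∀ res : List Int, (ks.foldl (pvStepIn ps a) res).length = res.length := by
  induction ks with
  | nil => intro res; rfl
  | cons x xs ih =>
    intro res
    rw [List.foldl_cons, ih]
    exact pvLen_inc res _

theorem pvGet_in (ps : List Int) (a : Int) (k : Nat) (ks : List Int) :
    ∀ res : List Int, k < res.length →
    (ks.foldl (pvStepIn ps a) res).getD k 0
      = res.getD k 0 + ((ks.countP (fun b => decide (PySem.List.pyGetD ps b 0 - PySem.List.pyGetD ps a 0 - 1 = (k : Int)))) : Int) := by
  induction ks with
  | nil => intro res _; simp
  | cons x xs ih =>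
    intro res hk
    rw [List.foldl_cons, List.countP_cons]
    have hk' : k < (pvStepIn ps a res x).length := pvLen_inc res _ ▸ hk
    rw [ih _ hk']
    unfold pvStepIn
    rw [pvGet_inc res _ k hk]
    by_cases he : PySem.List.pyGetD ps x 0 - PySem.List.pyGetD ps a 0 - 1 = (k : Int)
    · rw [if_pos (show (k : Int) = _ from he.symm)]
      simp [he]
      omega
    · rw [if_neg (fun hx => he hx.symm)]
      simp [he]

theorem pvLen_mid (ps : List Int) (as_ : List Int) :
    ∀ res : List Int, (as_.foldl (pvStepMid ps) res).length = res.length := by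
  induction as_ with
  | nil => intro res; rfl
  | cons x xs ih =>
    intro res
    rw [List.foldl_cons, ih]
    exact pvLen_in ps x _ res

theorem pvGet_mid (ps : List Int) (k : Nat) (as_ : List Int) :
    ∀ res : List Int, k < res.length →
    (as_.foldl (pvStepMid ps) res).getD k 0
      = res.getD k 0 + (as_.map (fun a => (pvCnt ps k a : Int))).sum := by
  induction as_ with
  | nil => intro res _; simp
  | cons x xs ih =>
    intro res hk
    rw [List.foldl_cons, List.map_cons, List.sum_cons]
    have hk' : k < (pvStepMid ps res x).length := by
      unfold pvStepMid; rw [pvLen_in]; exact hk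
    rw [ih _ hk']
    unfold pvStepMid pvCnt
    rw [pvGet_in ps x k _ res hk]
    ring

theorem pvLen_out (l : List Char) (cs : List Char) :
    ∀ res : List Int, (cs.foldl (pvStepOut l) res).length = res.length := by
  induction cs with
  | nil => intro res; rfl
  | cons x xs ih =>
    intro res
    rw [List.foldl_cons, ih]
    unfold pvStepOut
    split
    · rfl
    · exact pvLen_mid _ _ res

theorem pvGet_out (l : List Char) (k : Nat) (cs : List Char) :
    ∀ res : List Int, k < res.length →
    (cs.foldl (pvStepOut l) res).getD k 0
      = res.getD k 0 + (cs.map (fun c => if c = ' ' then (0 : Int)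
          else ((PySem.List.pyRange 0 ((pvPos l c).length : Int) 1).map
            (fun a => (pvCnt (pvPos l c) k a : Int))).sum)).sum := by
  induction cs with
  | nil => intro res _; simp
  | cons x xs ih =>
    intro res hk
    rw [List.foldl_cons, List.map_cons, List.sum_cons]
    have hk' : k < (pvStepOut l res x).length := by
      unfold pvStepOut; split
      · exact hk
      · rw [pvLen_mid]; exact hk
    rw [ih _ hk']
    unfold pvStepOut
    by_cases hc : x = ' '
    · rw [if_pos hc]; simp [hc]
    · rw [if_neg hc, pvGet_mid _ k _ res hk]
      simp [hc]; ring

-- membership in a character's position list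
theorem pvMem_pos (l : List Char) (c : Char) (x : Int) :
    x ∈ pvPos l c ↔ 0 ≤ x ∧ x < (l.length : Int) ∧ pvAt l x = c := by
  unfold pvPos
  rw [List.mem_filter, PySem.List.mem_pyRange_one]
  simp [and_assoc]

theorem pvPos_sorted (l : List Char) (c : Char) : (pvPos l c).Pairwise (· < ·) :=
  List.Pairwise.filter _ (PySem.List.pairwise_lt_pyRange_one 0 (l.length : Int))

theorem pvPos_nodup (l : List Char) (c : Char) : (pvPos l c).Nodup :=
  (PySem.List.nodup_pyRange_one 0 (l.length : Int)).filter _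

-- strict monotonicity of getElem on a pairwise-lt list
theorem pvSorted_get_lt (ps : List Int) (h : ps.Pairwise (· < ·)) (a b : Nat)
    (hab : a < b) (hb : b < ps.length) : ps[a]'(by omega) < ps[b] := by
  exact List.pairwise_iff_getElem.mp h a b (by omega) hb hab

-- row a's count: 1 iff ps[a] + (k+1) occurs in ps, else 0
theorem pvCnt_row (ps : List Int) (hnd : ps.Nodup) (hsort : ps.Pairwise (· < ·))
    (k : Nat) (a : Int) (h0 : 0 ≤ a) (ha : a < (ps.length : Int)) :
    (pvCnt ps k a : Int) = if PySem.List.pyGetD ps a 0 + ((k : Int) + 1) ∈ ps then 1 else 0 := by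
  have haN : a.toNat < ps.length := by omega
  have hga : PySem.List.pyGetD ps a 0 = ps[a.toNat] := PySem.List.pyGetD_eq_getElem ps 0 h0 ha
  unfold pvCnt
  have h1 : a + 1 = (((a.toNat + 1 : Nat) : Int)) := by omega
  have hmap : (PySem.List.pyRange (a + 1) ((ps.length : Int)) 1).map
      (fun b => PySem.List.pyGetD ps b 0) = ps.drop (a.toNat + 1) := by
    rw [h1]
    exact PySem.List.map_pyGetD_pyRange' ps 0 (by positivity)
  have hcp : (PySem.List.pyRange (a + 1) ((ps.length : Int)) 1).countP
      (fun b => decide (PySem.List.pyGetD ps b 0 - PySem.List.pyGetD ps a 0 - 1 = (k : Int)))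
      = (ps.drop (a.toNat + 1)).countP (fun v => decide (v - ps[a.toNat] - 1 = (k : Int))) := by
    rw [← hmap, List.countP_map]
    apply List.countP_congr
    intro b _
    simp [Function.comp, hga]
  rw [hcp, hga]
  have hdnd : (ps.drop (a.toNat + 1)).Nodup := hnd.sublist (List.drop_sublist _ _)
  have hcount : (ps.drop (a.toNat + 1)).countP (fun v => decide (v - ps[a.toNat] - 1 = (k : Int)))
      = (ps.drop (a.toNat + 1)).count (ps[a.toNat] + ((k : Int) + 1)) := by
    rw [List.count]
    apply List.countP_congr
    intro v _
    simp only [decide_eq_true_eq, beq_iff_eq]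
    omega
  rw [hcount]
  by_cases hm : ps[a.toNat] + ((k : Int) + 1) ∈ ps
  · rw [if_pos hm]
    -- the target value is > ps[a], hence its occurrence lies past index a
    obtain ⟨b, hb, hbe⟩ := List.getElem_of_mem hm
    have hbgt : a.toNat < b := by
      by_contra hle
      rcases Nat.lt_or_ge b a.toNat with hba | hba
      · have := pvSorted_get_lt ps hsort b a.toNat hba haN
        omega
      · have hba' : b = a.toNat := by omega
        subst hba'
        omega
    have hmem : ps[a.toNat] + ((k : Int) + 1) ∈ ps.drop (a.toNat + 1) := by
      have hlen : b - (a.toNat + 1) < (ps.drop (a.toNat + 1)).length := by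
        rw [List.length_drop]; omega
      refine List.mem_iff_getElem.mpr ⟨b - (a.toNat + 1), hlen, ?_⟩
      have hge := List.getElem_drop (xs := ps) (i := a.toNat + 1) (j := b - (a.toNat + 1)) (h := hlen)
      rw [hge, ← hbe]
      simp only [show a.toNat + 1 + (b - (a.toNat + 1)) = b from by omega]
    rw [List.count_eq_one_of_mem hdnd hmem]
    norm_num
  · rw [if_neg hm, List.count_eq_zero_of_not_mem]
    · norm_num
    · intro hmem
      exact hm (List.mem_of_mem_drop hmem)

-- pulling an index loop over a list back to the list itself
theorem pvMap_getD (ps : List Int) (g : Int → Int) :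
    (PySem.List.pyRange 0 ((ps.length : Int)) 1).map (fun a => g (PySem.List.pyGetD ps a 0))
      = ps.map g := by
  have h := PySem.List.map_pyGetD_pyRange_zero' ps 0
  calc (PySem.List.pyRange 0 ((ps.length : Int)) 1).map (fun a => g (PySem.List.pyGetD ps a 0))
      = ((PySem.List.pyRange 0 ((ps.length : Int)) 1).map (fun j => PySem.List.pyGetD ps j 0)).map g := by
        rw [List.map_map]; rfl
    _ = ps.map g := by rw [h]

-- the scatter rows of one position list sum to a count of "partner k+1 ahead" elements
theorem pvSum_rows (ps : List Int) (hnd : ps.Nodup) (hsort : ps.Pairwise (· < ·)) (k : Nat) :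
    ((PySem.List.pyRange 0 ((ps.length : Int)) 1).map (fun a => (pvCnt ps k a : Int))).sum
      = ((ps.countP (fun x => decide (x + ((k : Int) + 1) ∈ ps))) : Int) := by
  have h1 : (PySem.List.pyRange 0 ((ps.length : Int)) 1).map (fun a => (pvCnt ps k a : Int))
      = (PySem.List.pyRange 0 ((ps.length : Int)) 1).map
          (fun a => (fun x => if x + ((k : Int) + 1) ∈ ps then (1 : Int) else 0) (PySem.List.pyGetD ps a 0)) := by
    apply List.map_congr_left
    intro a ha
    rw [PySem.List.mem_pyRange_one] at ha
    exact pvCnt_row ps hnd hsort k a ha.1 ha.2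
  rw [h1, pvMap_getD ps (fun x => if x + ((k : Int) + 1) ∈ ps then (1 : Int) else 0)]
  have h2 : ps.map (fun x => if x + ((k : Int) + 1) ∈ ps then (1 : Int) else 0)
      = ps.map (fun x => if decide (x + ((k : Int) + 1) ∈ ps) = true then (1 : Int) else 0) := by
    apply List.map_congr_left
    intro x _
    simp
  rw [h2, PySem.List.sum_map_ite_one_zero]

-- the "partner ahead" count over a character's position list, as a guarded count over left indices
theorem pvPos_count (l : List Char) (c : Char) (hc : c ≠ ' ') (k : Nat) :
    (pvPos l c).countP (fun x => decide (x + ((k : Int) + 1) ∈ pvPos l c))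
      = (List.range l.length).countP (fun j : Nat => decide (pvAt l ↑j = c) && pvPB l k j) := by
  have hstep1 : (pvPos l c).countP (fun x => decide (x + ((k : Int) + 1) ∈ pvPos l c))
      = (pvPos l c).countP (fun x => decide (0 ≤ x + ((k : Int) + 1)
          ∧ x + ((k : Int) + 1) < (l.length : Int) ∧ pvAt l (x + ((k : Int) + 1)) = c)) := by
    apply List.countP_congr
    intro x _
    simp only [decide_eq_true_eq]
    exact pvMem_pos l c _
  rw [hstep1]
  unfold pvPos
  rw [List.countP_filter, PySem.List.pyRange_one]
  have hn : (((l.length : Int)) - 0).toNat = l.length := by omega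
  rw [hn, List.countP_map]
  apply List.countP_congr
  intro j hj
  rw [List.mem_range] at hj
  simp only [Function.comp, Bool.and_eq_true, decide_eq_true_eq]
  have hz : ((0:Int) + (j:Int)) = ((j : Nat) : Int) := by ring
  rw [hz]
  have hcast : ((j : Int) + ((k : Int) + 1)) = ((j + k + 1 : Nat) : Int) := by push_cast; ring
  rw [hcast]
  unfold pvPB
  constructor
  · rintro ⟨⟨_, hlt, hat⟩, hcj⟩
    have hjk : j + k + 1 < l.length := by exact_mod_cast hlt
    exact ⟨hcj, decide_eq_true ⟨hjk, by rw [hat, hcj], by rw [hcj]; exact hc⟩⟩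
  · rintro ⟨hcj, hpb⟩
    obtain ⟨hjk, hat, _⟩ := of_decide_eq_true hpb
    exact ⟨⟨by positivity, by exact_mod_cast hjk, by rw [hat, hcj]⟩, hcj⟩

-- the whole per-character contribution equals a guarded count over left indices
theorem pvContrib_char (l : List Char) (c : Char) (hc : c ≠ ' ') (k : Nat) :
    ((PySem.List.pyRange 0 ((pvPos l c).length : Int) 1).map
        (fun a => (pvCnt (pvPos l c) k a : Int))).sum
      = ((List.range l.length).countP
          (fun j : Nat => decide (pvAt l ↑j = c) && pvPB l k j) : Int) := by
  rw [pvSum_rows (pvPos l c) (pvPos_nodup l c) (pvPos_sorted l c) k,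
      pvPos_count l c hc k]

-- summing guarded counts over a duplicate-free character list = one count with a membership guard
theorem pvPartition (ns : List Nat) (p : Nat → Bool) (key : Nat → Char) :
    ∀ cs : List Char, cs.Nodup →
    (cs.map (fun c => ((ns.countP (fun j => decide (key j = c) && p j)) : Int))).sum
      = ((ns.countP (fun j => decide (key j ∈ cs) && p j)) : Int) := by
  intro cs
  induction ns with
  | nil => intro _; simp
  | cons j ns ih =>
    intro hnd
    have hmap : (cs.map (fun c => (((j :: ns).countP (fun j' => decide (key j' = c) && p j')) : Int)))
        = cs.map (fun c => ((ns.countP (fun j' => decide (key j' = c) && p j')) : Int)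
            + (if decide (key j = c) && p j then 1 else 0)) := by
      apply List.map_congr_left
      intro c _
      rw [List.countP_cons]
      split <;> simp
    rw [hmap, PySem.List.sum_map_add_int, ih hnd]
    rw [List.countP_cons]
    have hsum : (cs.map (fun c => if decide (key j = c) && p j then (1 : Int) else 0)).sum
        = if decide (key j ∈ cs) && p j then 1 else 0 := by
      rw [PySem.List.sum_map_ite_one_zero]
      by_cases hp : p j = true
      · have : (cs.countP (fun c => decide (key j = c) && p j)) = cs.countP (fun c => c == key j) := by
          apply List.countP_congr
          intro c _
          simp only [Bool.and_eq_true, decide_eq_true_eq, beq_iff_eq, hp, and_true]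
          exact eq_comm
        rw [this]
        have : cs.countP (fun c => c == key j) = cs.count (key j) := rfl
        rw [this]
        by_cases hm : key j ∈ cs
        · rw [List.count_eq_one_of_mem hnd hm]
          simp [hm, hp]
        · rw [List.count_eq_zero_of_not_mem hm]
          simp [hm]
      · have hp' : p j = false := by
          cases h : p j
          · rfl
          · exact absurd h hp
        simp [hp']
    rw [hsum]
    split <;> simp

-- B computes, in slot k, the number of left indices j with a match at shift k+1
theorem pvB_char (s : String) :
    find_matchings_alt s = (List.range (s.toList.length - 1)).map
      (fun k => (((List.range s.toList.length).countP (pvPB s.toList k)) : Int)) := by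
  set l := s.toList with hl
  have hlen0 : (List.replicate (l.length - 1) (0:Int)).length = l.length - 1 := List.length_replicate
  apply List.ext_getElem
  · rw [pvB_unfold, pvLen_out, hlen0, List.length_map, List.length_range]
  · intro k h1 h2
    rw [List.length_map, List.length_range] at h2
    rw [List.getElem_map, List.getElem_range]
    have hk : k < (List.replicate (l.length - 1) (0:Int)).length := by rw [hlen0]; exact h2
    have hgd : (find_matchings_alt s)[k] = (find_matchings_alt s).getD k 0 := by
      rw [List.getD_eq_getElem]
    rw [hgd, pvB_unfold, pvGet_out l k _ _ hk, List.getD_replicate _ h2]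
    -- turn the skipped-space terms into guarded counts
    have hterm : (PySem.List.dedup l).map (fun c => if c = ' ' then (0 : Int)
          else ((PySem.List.pyRange 0 ((pvPos l c).length : Int) 1).map
            (fun a => (pvCnt (pvPos l c) k a : Int))).sum)
        = (PySem.List.dedup l).map (fun c =>
            (((List.range l.length).countP (fun j : Nat => decide (pvAt l ↑j = c) && pvPB l k j)) : Int)) := by
      apply List.map_congr_left
      intro c _
      by_cases hc : c = ' '
      · rw [if_pos hc]
        have hzero : (List.range l.length).countP (fun j : Nat => decide (pvAt l ↑j = c) && pvPB l k j) = 0 := by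
          rw [List.countP_eq_zero]
          intro j _
          simp only [Bool.and_eq_true, decide_eq_true_eq, not_and]
          intro hcj hpb
          have hpb' := of_decide_eq_true (hpb : pvPB l k j = true)
          exact hpb'.2.2 (by rw [hcj, hc])
        rw [hzero]
        norm_num
      · rw [if_neg hc, pvContrib_char l c hc k]
    have hpart := pvPartition (List.range l.length) (pvPB l k) (fun j : Nat => pvAt l ↑j)
      (PySem.List.dedup l) (PySem.List.nodup_dedup l)
    rw [hterm, hpart]
    have hfinal : (List.range l.length).countP (fun j : Nat => decide (pvAt l ↑j ∈ PySem.List.dedup l) && pvPB l k j)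
        = (List.range l.length).countP (pvPB l k) := by
      apply List.countP_congr
      intro j hj
      rw [List.mem_range] at hj
      by_cases hpb : pvPB l k j = true
      · have hjlt : j < l.length := by
          have := (of_decide_eq_true hpb).1
          omega
        have hmem : pvAt l ↑j ∈ l := by
          have : pvAt l (↑j) = l[j] := by
            unfold pvAt
            rw [PySem.List.pyGetD_natCast, List.getD_eq_getElem _ _ hjlt]
          rw [this]
          exact List.getElem_mem _
        simp [hpb, hmem]
      · have hpb' : pvPB l k j = false := by
          cases h : pvPB l k j
          · rfl
          · exact absurd h hpb
        simp [hpb']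
    rw [hfinal]
    ring

-- at each slot the two counts agree: the guarded count over all j equals A's count over j < n - (k+1)
theorem pvBridge (l : List Char) (k : Nat) (hk : k < l.length - 1) :
    (List.range l.length).countP (pvPB l k)
      = (List.range (l.length - (k+1))).countP (pvPA l (k+1)) := by
  have hr : List.range l.length
      = List.range (l.length - (k+1)) ++ (List.range (k+1)).map (fun x => l.length - (k+1) + x) := by
    conv_lhs => rw [show l.length = (l.length - (k+1)) + (k+1) from by omega]
    exact List.range_add
  rw [hr, List.countP_append]
  have h2 : ((List.range (k+1)).map (fun x => l.length - (k+1) + x)).countP (pvPB l k) = 0 := by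
    rw [List.countP_eq_zero]
    intro a ha
    rw [List.mem_map] at ha
    obtain ⟨x, hx, rfl⟩ := ha
    unfold pvPB
    simp only [decide_eq_true_eq]
    intro hcon
    omega
  rw [h2, Nat.add_zero]
  apply List.countP_congr
  intro j hj
  rw [List.mem_range] at hj
  unfold pvPB pvPA
  simp only [decide_eq_true_eq]
  constructor
  · intro ⟨h1, h2', h3⟩
    have : (k + 1) + j = j + k + 1 := by omega
    rw [this]
    exact ⟨h2'.symm, h3, by rw [h2']; exact h3⟩
  · intro ⟨h1, h2', h3⟩
    have he : (k + 1) + j = j + k + 1 := by omega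
    rw [he] at h1 h3
    exact ⟨by omega, h1.symm, h2'⟩

-- ===== VERDICT (by name: the statement is the Claim_ definition above) =====
theorem find_matchings_spec : Claim_equal_find_matchings := by
  intro s _
  unfold Spec_find_matchings
  rw [pvA_char, pvB_char]
  apply List.map_congr_left
  intro k hk
  rw [List.mem_range] at hk
  rw [pvBridge s.toList k hk]
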